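-- pv_equiv track=rewrite | github.com/zhmu/dogfood | kernel-test/generate-ext2-image.py | generate_updates
-- ===== SOURCE A (Python) =====
-- def generate_updates(buf):
--     updates = [ ]
--     cur_update = None
--     for n, c in enumerate(buf):
--         if cur_update is not None:
--             if cur_update['byte'] == c:
--                 cur_update['end'] = n
--                 continue
--
--             updates.append(cur_update)
--             cur_update = None
--
--         if c == 0:
--             continue
--         cur_update = { 'start': n, 'end': n, 'byte': c }
--
--     if cur_update is not None:
--         updates.append(cur_update)
--     return updates
-- ===== SOURCE B (Python) =====
-- def generate_updates(buf):
--     updates = []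
--     i = 0
--     n = len(buf)
--     while i < n:
--         j = i
--         while j < n and buf[j] == buf[i]:
--             j += 1
--         if buf[i] != 0:
--             updates.append({'start': i, 'end': j - 1, 'byte': buf[i]})
--         i = j
--     return updates
-- ===== Notes on version B (the rewrite author's own statement) =====
-- stated objective: alternative
-- what changed: Replaces A's element-by-element enumerate scan with an optional carry-over run dict by a two-pointer scan that finds each maximal equal run [i,j) at once and emits the entry directly, with no carried state.
import Mathlib
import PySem

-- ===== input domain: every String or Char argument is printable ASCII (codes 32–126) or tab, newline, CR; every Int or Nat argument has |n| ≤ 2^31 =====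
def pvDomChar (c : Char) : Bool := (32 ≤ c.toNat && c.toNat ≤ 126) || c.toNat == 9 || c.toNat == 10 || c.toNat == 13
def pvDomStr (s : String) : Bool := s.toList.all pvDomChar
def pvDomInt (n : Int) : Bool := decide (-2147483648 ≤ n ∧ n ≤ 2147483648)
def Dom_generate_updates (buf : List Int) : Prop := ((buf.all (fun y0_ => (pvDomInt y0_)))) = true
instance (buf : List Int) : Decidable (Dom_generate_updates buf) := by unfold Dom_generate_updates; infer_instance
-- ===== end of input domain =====

-- B replaces A's carry-over run state machine by a two-pointer maximal-run scan; same O(n) cost.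

-- B replaces A's carry-over run state machine by a two-pointer maximal-run scan; same O(n) cost.

-- ===== PORT A =====
-- Python dicts here have String keys; dict -> assoc list per the type convention.
-- u['byte'] lookup: the key is always present in A's dicts (they are all built with it), so the [] case is unreachable.
def pvDictGet (d : List (String × Int)) (k : String) : Int :=
  match d with
  | [] => 0
  | (k', v) :: t => if k' = k then v else pvDictGet t k

def pvDictSet (d : List (String × Int)) (k : String) (v : Int) : List (String × Int) :=
  match d with
  | [] => [(k, v)]
  | (k', v') :: t => if k' = k then (k, v) :: t else (k', v') :: pvDictSet t k v

def pvGoA (l : List (Int × Int)) (updates : List (List (String × Int)))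
    (cur : Option (List (String × Int))) : List (List (String × Int)) :=
  match l with
  | [] =>
    match cur with
    | none => updates
    | some u => updates ++ [u]
  | (n, c) :: rest =>
    match cur with
    | some u =>
      if pvDictGet u "byte" = c then
        pvGoA rest updates (some (pvDictSet u "end" n))
      else
        if c = 0 then pvGoA rest (updates ++ [u]) none
        else pvGoA rest (updates ++ [u]) (some [("start", n), ("end", n), ("byte", c)])
    | none =>
      if c = 0 then pvGoA rest updates none
      else pvGoA rest updates (some [("start", n), ("end", n), ("byte", c)])

def generate_updates (buf : List Int) : List (List (String × Int)) :=
  pvGoA (PySem.List.enumerate buf 0) [] none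

-- ===== PORT B =====
-- inner while: advance j while j < n and buf[j] == buf[i]  (v = buf[i]; getD is exact: the loop guard has
-- j < length).  The fuel argument only bounds the iteration count (buf.length always suffices: j stops at
-- buf.length); it makes the loop a structural recursion and changes no computed value.
def pvRunEnd (buf : List Int) (v : Int) : Nat → Nat → Nat
  | 0, j => j
  | fuel + 1, j => if j < buf.length ∧ buf.getD j 0 = v then pvRunEnd buf v fuel (j + 1) else j

-- outer while over i, emitting one entry per maximal non-zero run; fuel as above (i advances by ≥ 1 per step)
def pvGoB (buf : List Int) : Nat → Nat → List (List (String × Int))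
  | 0, _ => []
  | fuel + 1, i =>
    if i < buf.length then
      let v := buf.getD i 0
      let j := pvRunEnd buf v buf.length i
      (if v ≠ 0 then [[("start", (i : Int)), ("end", (j : Int) - 1), ("byte", v)]] else []) ++
        pvGoB buf fuel j
    else []

def generate_updates_alt (buf : List Int) : List (List (String × Int)) :=
  pvGoB buf buf.length 0

-- ===== PRECONDITION & SPEC =====
def Spec_generate_updates (buf : List Int) (out : List (List (String × Int))) : Prop := out = generate_updates_alt buf
instance (buf : List Int) (out : List (List (String × Int))) : Decidable (Spec_generate_updates buf out) := by unfold Spec_generate_updates; infer_instance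

-- ===== CLAIM (what is proved, stated in full; the proofs are below) =====
def Claim_equal_generate_updates : Prop := ∀ (buf : List Int), Dom_generate_updates buf → Spec_generate_updates buf (generate_updates buf)

-- ===== LEMMAS AND PROOFS =====

-- common characterisation: the run-length encoding of the non-zero maximal runs of l, starting at position pos
def pvRuns (l : List Int) (pos : Int) : List (List (String × Int)) :=
  match l with
  | [] => []
  | c :: t =>
    let k := (t.takeWhile (· = c)).length
    (if c = 0 then [] else [[("start", pos), ("end", pos + k), ("byte", c)]]) ++
      pvRuns (t.drop k) (pos + k + 1)
termination_by l.length
decreasing_by have := (List.takeWhile_sublist (l := t) (fun x => decide (x = c))).length_le; simp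

theorem pvRuns_nil (pos : Int) : pvRuns [] pos = [] := by rw [pvRuns.eq_def]

theorem pvRuns_cons (c : Int) (t : List Int) (pos : Int) :
    pvRuns (c :: t) pos =
      (if c = 0 then [] else
        [[("start", pos), ("end", pos + ((t.takeWhile (· = c)).length : Int)), ("byte", c)]]) ++
      pvRuns (t.drop (t.takeWhile (· = c)).length) (pos + (t.takeWhile (· = c)).length + 1) := by
  rw [pvRuns.eq_def]

theorem pvRuns_zero_cons (t : List Int) : ∀ (pos : Int),
    pvRuns (0 :: t) pos = pvRuns t (pos + 1) := by
  induction t with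
  | nil => intro pos; rw [pvRuns_cons]; simp [pvRuns_nil]
  | cons c t' ih =>
    intro pos
    by_cases hc : c = 0
    · subst hc
      rw [pvRuns_cons, pvRuns_cons]
      simp only [List.takeWhile_cons, decide_true]
      simp [List.length_cons]
      congr 1
      ring
    · simp only [pvRuns_cons]
      simp [hc]
      rw [pvRuns_cons]
      simp [hc]

theorem pvRunEnd_eq (buf : List Int) (v : Int) : ∀ (fuel j : Nat), buf.length - j ≤ fuel →
    pvRunEnd buf v fuel j = j + ((buf.drop j).takeWhile (· = v)).length := by
  intro fuel
  induction fuel with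
  | zero =>
    intro j hj
    rw [pvRunEnd, List.drop_eq_nil_iff.mpr (by omega)]
    simp
  | succ m ih =>
    intro j hj
    rw [pvRunEnd]
    by_cases hjl : j < buf.length
    · have hdrop : buf.drop j = buf[j] :: buf.drop (j + 1) :=
        List.drop_eq_getElem_cons hjl
      have hgd : buf.getD j 0 = buf[j] := List.getD_eq_getElem buf 0 hjl
      by_cases hv : buf[j] = v
      · rw [if_pos ⟨hjl, by rw [hgd]; exact hv⟩, ih (j + 1) (by omega), hdrop]
        simp [hv]
        omega
      · rw [if_neg (by rw [hgd]; tauto), hdrop]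
        simp [hv]
    · rw [if_neg (by omega), List.drop_eq_nil_iff.mpr (by omega)]
      simp

theorem pvGoB_spec (buf : List Int) : ∀ (fuel i : Nat), buf.length - i ≤ fuel →
    pvGoB buf fuel i = pvRuns (buf.drop i) i := by
  intro fuel
  induction fuel with
  | zero =>
    intro i hi
    rw [pvGoB, List.drop_eq_nil_iff.mpr (by omega), pvRuns_nil]
  | succ m ih =>
    intro i hi
    rw [pvGoB]
    by_cases hil : i < buf.length
    · have hgd : buf.getD i 0 = buf[i] := List.getD_eq_getElem buf 0 hil
      rw [if_pos hil]
      simp only [hgd]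
      have hdrop : buf.drop i = buf[i] :: buf.drop (i + 1) :=
        List.drop_eq_getElem_cons hil
      set k := ((buf.drop (i+1)).takeWhile (· = buf[i])).length with hk
      have hre : pvRunEnd buf buf[i] buf.length i = i + 1 + k := by
        rw [pvRunEnd_eq buf buf[i] buf.length i (by omega), hdrop, List.takeWhile_cons,
          if_pos (by simp)]
        simp only [List.length_cons, ← hk]
        omega
      have hj1 : k ≤ buf.length - (i + 1) := by
        have h2 : ((buf.drop (i+1)).takeWhile (· = buf[i])).length ≤ (buf.drop (i+1)).length :=
          (List.takeWhile_sublist _).length_le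
        simp [List.length_drop] at h2
        omega
      have hrec : pvGoB buf m (i + 1 + k) = pvRuns (buf.drop (i + 1 + k)) ((i : Int) + 1 + k) := by
        have := ih (i + 1 + k) (by omega)
        rw [this]; congr 1
      have hdd : (buf.drop (i+1)).drop k = buf.drop (i + 1 + k) := by
        rw [List.drop_drop]
      rw [hre, hrec, hdrop, pvRuns_cons, ← hk, hdd]
      by_cases hz : buf[i] = 0
      · simp only [hz, ne_eq, not_true_eq_false]
        simp
        congr 1
        ring
      · simp only [ne_eq, hz, not_false_eq_true]
        simp
        refine ⟨by ring, ?_⟩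
        congr 1
        ring
    · rw [if_neg hil, List.drop_eq_nil_iff.mpr (by omega), pvRuns_nil]

theorem pvGoA_nil_none (acc : List (List (String × Int))) : pvGoA [] acc none = acc := rfl
theorem pvGoA_nil_some (acc : List (List (String × Int))) (u : List (String × Int)) :
    pvGoA [] acc (some u) = acc ++ [u] := rfl
theorem pvGoA_cons_none (n c : Int) (rest : List (Int × Int)) (acc : List (List (String × Int))) :
    pvGoA ((n, c) :: rest) acc none =
      if c = 0 then pvGoA rest acc none
      else pvGoA rest acc (some [("start", n), ("end", n), ("byte", c)]) := rfl
theorem pvGoA_cons_some (n c : Int) (rest : List (Int × Int)) (acc : List (List (String × Int)))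
    (u : List (String × Int)) :
    pvGoA ((n, c) :: rest) acc (some u) =
      if pvDictGet u "byte" = c then pvGoA rest acc (some (pvDictSet u "end" n))
      else
        if c = 0 then pvGoA rest (acc ++ [u]) none
        else pvGoA rest (acc ++ [u]) (some [("start", n), ("end", n), ("byte", c)]) := rfl

theorem pvGoA_spec (l : List Int) : ∀ (pos : Int) (acc : List (List (String × Int))),
    (pvGoA (PySem.List.enumerate l pos) acc none = acc ++ pvRuns l pos) ∧
    (∀ s e b, b ≠ 0 →
      pvGoA (PySem.List.enumerate l pos) acc (some [("start", s), ("end", e), ("byte", b)]) =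
        acc ++ [[("start", s),
                 ("end", if (l.takeWhile (· = b)).length = 0 then e
                         else pos + (l.takeWhile (· = b)).length - 1),
                 ("byte", b)]] ++
          pvRuns (l.drop (l.takeWhile (· = b)).length) (pos + (l.takeWhile (· = b)).length)) := by
  induction l with
  | nil =>
    intro pos acc
    constructor
    · simp [PySem.List.enumerate_nil, pvGoA_nil_none, pvRuns_nil]
    · intro s e b hb
      simp [PySem.List.enumerate_nil, pvGoA_nil_some, pvRuns_nil]
  | cons c t ih =>
    intro pos acc
    constructor
    · rw [PySem.List.enumerate_cons, pvGoA_cons_none]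
      by_cases hc : c = 0
      · rw [if_pos hc, (ih (pos + 1) acc).1, hc, pvRuns_zero_cons]
      · rw [if_neg hc]
        rw [(ih (pos + 1) acc).2 pos pos c hc, pvRuns_cons]
        simp only [if_neg hc]
        by_cases hk : (t.takeWhile (· = c)).length = 0
        · simp [hk]
        · simp only [hk]
          simp
          refine ⟨by ring, ?_⟩
          congr 1
          ring
    · intro s e b hb
      rw [PySem.List.enumerate_cons, pvGoA_cons_some]
      by_cases hbc : b = c
      · subst hbc
        have hget : pvDictGet [("start", s), ("end", e), ("byte", b)] "byte" = b := by
          simp [pvDictGet]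
        have hset : pvDictSet [("start", s), ("end", e), ("byte", b)] "end" pos
            = [("start", s), ("end", pos), ("byte", b)] := by
          simp [pvDictSet]
        rw [hget, if_pos rfl, hset, (ih (pos + 1) acc).2 s pos b hb]
        simp only [List.takeWhile_cons, decide_eq_true_eq, if_true]
        simp only [List.length_cons, List.drop_succ_cons]
        rw [if_neg (Nat.succ_ne_zero _)]
        push_cast
        have h1 : (if (t.takeWhile (· = b)).length = 0 then pos
            else pos + 1 + ((t.takeWhile (· = b)).length : Int) - 1)
            = pos + ((t.takeWhile (· = b)).length : Int) + 1 - 1 := by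
          split_ifs with h
          · simp [h]
          · ring
        have h2 : pos + 1 + ((t.takeWhile (· = b)).length : Int)
            = pos + ((t.takeWhile (· = b)).length : Int) + 1 := by ring
        rw [h1, h2]
        ring_nf
      · have hget : pvDictGet [("start", s), ("end", e), ("byte", b)] "byte" = b := by
          simp [pvDictGet]
        rw [hget, if_neg (by exact hbc)]
        have hk0 : ((c :: t).takeWhile (· = b)).length = 0 := by
          simp [(by simpa using (Ne.symm hbc) : ¬ (c = b))]
        by_cases hc : c = 0
        · rw [if_pos hc, (ih (pos + 1) (acc ++ [[("start", s), ("end", e), ("byte", b)]])).1, hk0]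
          subst hc
          simp [pvRuns_zero_cons]
        · rw [if_neg hc, (ih (pos + 1) (acc ++ [[("start", s), ("end", e), ("byte", b)]])).2 pos pos c hc, hk0]
          simp only [List.drop_zero, Nat.cast_zero, add_zero]
          rw [pvRuns_cons]
          simp only [if_neg hc]
          by_cases hk : (t.takeWhile (· = c)).length = 0
          · simp [hk]
          · simp only [hk]
            simp
            refine ⟨by ring, ?_⟩
            congr 1
            ring

-- ===== VERDICT (by name: the statement is the Claim_ definition above) =====
theorem generate_updates_spec : Claim_equal_generate_updates := by
  intro buf _
  unfold Spec_generate_updates generate_updates generate_updates_alt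
  rw [(pvGoA_spec buf 0 []).1, pvGoB_spec buf buf.length 0 (by omega)]
  simp
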